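-- pv_equiv track=rewrite | github.com/astroforgit/pokergenerator | decompile_atari.py | parse_var_table
-- ===== SOURCE A (Python) =====
-- def parse_var_table(data, vnt_start, vnt_end):
--     # VNT: List of strings, last char has 0x80 set
--     vnt_data = data[vnt_start:vnt_end]
--     variables = []
--     current_name = ""
--     for b in vnt_data:
--         char_code = b & 0x7F
--         current_name += chr(char_code)
--         if b & 0x80:
--             variables.append(current_name)
--             current_name = ""
--     return variables
-- ===== SOURCE B (Python) =====
-- def parse_var_table(data, vnt_start, vnt_end):
--     # Index-based tokenizer: record where each 0x80-terminated token ends and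
--     # decode whole slices, instead of accumulating characters one at a time.
--     vnt = data[vnt_start:vnt_end]
--     names = []
--     start = 0
--     for i, b in enumerate(vnt):
--         if b & 0x80:
--             names.append(''.join(chr(c & 0x7F) for c in vnt[start:i + 1]))
--             start = i + 1
--     return names
-- ===== Notes on version B (the rewrite author's own statement) =====
-- stated objective: alternative
-- what changed: Replaced A's per-character accumulator state machine by an index-based tokenizer that records where each 0x80-terminated name ends and decodes whole slices at once.
import Mathlib
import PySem

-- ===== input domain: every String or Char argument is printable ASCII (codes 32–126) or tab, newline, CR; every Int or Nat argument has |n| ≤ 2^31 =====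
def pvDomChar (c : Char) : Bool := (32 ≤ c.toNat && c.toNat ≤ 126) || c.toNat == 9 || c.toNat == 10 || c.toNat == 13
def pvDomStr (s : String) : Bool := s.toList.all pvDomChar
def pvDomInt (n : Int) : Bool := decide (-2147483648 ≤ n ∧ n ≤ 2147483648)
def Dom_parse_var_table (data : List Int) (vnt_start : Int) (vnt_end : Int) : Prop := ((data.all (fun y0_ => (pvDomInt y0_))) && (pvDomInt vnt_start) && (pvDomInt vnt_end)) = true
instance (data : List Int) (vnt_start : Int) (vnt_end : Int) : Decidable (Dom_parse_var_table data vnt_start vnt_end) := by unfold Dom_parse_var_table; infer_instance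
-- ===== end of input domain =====

-- B replaces A's per-character accumulator state machine by an index-based
-- tokenizer that records where each 0x80-terminated token ends and decodes
-- whole slices (objective: alternative decomposition, same cost).

-- shared primitive subexpressions of both Pythons: chr(b & 0x7F) and the test 'b & 0x80'
def pvChar (b : Int) : Char := Char.ofNat (PySem.Int.band b 127).toNat
def pvTerm (b : Int) : Bool := PySem.Int.band b 128 != 0

-- ===== PORT A =====
def parse_var_table (data : List Int) (vnt_start : Int) (vnt_end : Int) : List String :=
  let vnt_data := PySem.List.slice data (some vnt_start) (some vnt_end)
  let st := vnt_data.foldl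
    (fun (p : List String × List Char) b =>
      let current_name := p.2 ++ [pvChar b]
      if pvTerm b then (p.1 ++ [String.ofList current_name], ([] : List Char))
      else (p.1, current_name))
    ([], [])
  st.1

-- ===== PORT B =====
def parse_var_table_alt (data : List Int) (vnt_start : Int) (vnt_end : Int) : List String :=
  let vnt := PySem.List.slice data (some vnt_start) (some vnt_end)
  let st := (PySem.List.enumerate vnt 0).foldl
    (fun (p : List String × Int) (ib : Int × Int) =>
      if pvTerm ib.2 then
        (p.1 ++ [String.ofList ((PySem.List.slice vnt (some p.2) (some (ib.1 + 1))).map pvChar)],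
         ib.1 + 1)
      else p)
    ([], 0)
  st.1

-- ===== PRECONDITION & SPEC =====
def Spec_parse_var_table (data : List Int) (vnt_start : Int) (vnt_end : Int) (out : List String) : Prop := out = parse_var_table_alt data vnt_start vnt_end
instance (data : List Int) (vnt_start : Int) (vnt_end : Int) (out : List String) : Decidable (Spec_parse_var_table data vnt_start vnt_end out) := by unfold Spec_parse_var_table; infer_instance

-- ===== CLAIM (what is proved, stated in full; the proofs are below) =====
def Claim_equal_parse_var_table : Prop := ∀ (data : List Int) (vnt_start : Int) (vnt_end : Int), Dom_parse_var_table data vnt_start vnt_end → Spec_parse_var_table data vnt_start vnt_end (parse_var_table data vnt_start vnt_end)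

-- ===== LEMMAS AND PROOFS =====

-- Invariant linking the two folds: process the suffix 'l' of 'vnt' that starts at
-- index k; A carries the pending characters vnt[s:k] decoded, B carries the index s.
theorem pv_fold_eq (vnt : List Int) :
    ∀ (l : List Int) (k s : Nat) (vars : List String),
      l = vnt.drop k → s ≤ k → k ≤ vnt.length →
      (l.foldl
        (fun (p : List String × List Char) b =>
          let current_name := p.2 ++ [pvChar b]
          if pvTerm b then (p.1 ++ [String.ofList current_name], ([] : List Char))
          else (p.1, current_name))
        (vars, ((vnt.drop s).take (k - s)).map pvChar)).1
      =
      ((PySem.List.enumerate l (k : Int)).foldl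
        (fun (p : List String × Int) (ib : Int × Int) =>
          if pvTerm ib.2 then
            (p.1 ++ [String.ofList ((PySem.List.slice vnt (some p.2) (some (ib.1 + 1))).map pvChar)],
             ib.1 + 1)
          else p)
        (vars, (s : Int))).1 := by
  intro l
  induction l with
  | nil => intro k s vars _ _ _; simp [PySem.List.enumerate]
  | cons b l' ih =>
    intro k s vars hl hsk hk
    have hklen : k < vnt.length := by
      by_contra h
      rw [List.drop_eq_nil_of_le (by omega)] at hl
      exact (List.cons_ne_nil _ _) hl
    have hb : vnt[k]? = some b := by
      have h0 : (vnt.drop k)[0]? = some b := by rw [← hl]; rfl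
      rwa [List.getElem?_drop, Nat.add_zero] at h0
    have hl' : l' = vnt.drop (k + 1) := by
      have h := congrArg List.tail hl
      simpa [List.tail_drop] using h
    -- the take grows by exactly vnt[k]
    have htake : (vnt.drop s).take (k + 1 - s) = (vnt.drop s).take (k - s) ++ [b] := by
      have h1 : k + 1 - s = (k - s) + 1 := by omega
      rw [h1, List.take_add_one]
      have : (vnt.drop s)[k - s]? = some b := by
        rw [List.getElem?_drop, show s + (k - s) = k by omega]
        exact hb
      simp [this]
    rw [PySem.List.enumerate_cons]
    by_cases ht : pvTerm b
    · simp only [List.foldl_cons, ht, if_pos]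
      have hslice : PySem.List.slice vnt (some (s : Int)) (some ((k : Int) + 1))
          = (vnt.drop s).take (k + 1 - s) := by
        have : (k : Int) + 1 = ((k + 1 : Nat) : Int) := by push_cast; ring
        rw [this, PySem.List.slice_natCast]
      have := ih (k + 1) (k + 1) (vars ++ [String.ofList (((vnt.drop s).take (k - s)).map pvChar ++ [pvChar b])]) hl' (le_refl _) (by omega)
      simp only [Nat.sub_self, List.take_zero, List.map_nil] at this
      rw [hslice, htake, List.map_append]
      push_cast at this ⊢
      exact this
    · simp only [List.foldl_cons, ht, if_neg, Bool.false_eq_true, not_false_iff]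
      have := ih (k + 1) s vars hl' (by omega) (by omega)
      rw [htake, List.map_append] at this
      push_cast at this ⊢
      exact this

-- ===== VERDICT (by name: the statement is the Claim_ definition above) =====
theorem parse_var_table_spec : Claim_equal_parse_var_table := by
  intro data vnt_start vnt_end _
  unfold Spec_parse_var_table parse_var_table parse_var_table_alt
  exact pv_fold_eq (PySem.List.slice data (some vnt_start) (some vnt_end)) _ 0 0 [] rfl (le_refl 0) (Nat.zero_le _)
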